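-- pv_equiv track=rewrite | github.com/thehalleyyoung/diversity-decoding | implementation/src/metrics/reference.py | skip_bigrams
-- ===== SOURCE A (Python) =====
-- from collections import Counter, defaultdict
-- from typing import (
--     Any,
--     Callable,
--     Dict,
--     List,
--     Optional,
--     Sequence,
--     Set,
--     Tuple,
--     Union,
-- )
--
-- def skip_bigrams(tokens: List[str], max_skip: int = -1) -> Counter:
--     """Generate skip-bigram counts.
--
--     If *max_skip* < 0 every pair is considered (no skip limit).
--     """
--     counts: Counter = Counter()
--     n = len(tokens)
--     for i in range(n):
--         upper = n if max_skip < 0 else min(n, i + max_skip + 2)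
--         for j in range(i + 1, upper):
--             counts[(tokens[i], tokens[j])] += 1
--     return counts
-- ===== SOURCE B (Python) =====
-- from collections import Counter
--
--
-- def skip_bigrams(tokens, max_skip=-1):
--     """Skip-bigram counts via an incremental sliding window, right to left.
--
--     Instead of enumerating every (i, j) pair, a single backward pass maintains
--     the current window's per-type counts (`cur`, in first-occurrence order):
--     moving from row i+1 to row i drops at most one position on the right and
--     prepends one on the left, O(distinct types) work per row.  A final pass
--     merges each row's per-type counts under its head token.
--     """
--     n = len(tokens)
--     rows = []            # per-type window counts for i = n-1 down to 0
--     cur = []             # (token, count) pairs of the current window, first-occurrence order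
--     prev_u = n
--     for i in range(n - 1, -1, -1):
--         u = n if max_skip < 0 else min(n, i + max_skip + 2)
--         if prev_u > u:                      # window loses its rightmost position
--             t = tokens[u]
--             if cur and cur[-1] == (t, 1):
--                 cur = cur[:-1]
--             else:
--                 cur = [(y, c - 1) if y == t else (y, c) for (y, c) in cur]
--         if i + 1 < u:                       # window gains position i+1 on the left
--             t = tokens[i + 1]
--             c = 0
--             for (y, cc) in cur:
--                 if y == t:
--                     c = cc
--             cur = [(t, c + 1)] + [(y, cc) for (y, cc) in cur if y != t]
--         rows.append(cur)
--         prev_u = u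
--     counts = Counter()
--     for x, row in zip(tokens, reversed(rows)):
--         for (y, c) in row:
--             counts[(x, y)] += c
--     return counts
-- ===== Notes on version B (the rewrite author's own statement) =====
-- stated objective: alternative
-- what changed: Replaces A's nested per-pair index loops by a single backward pass that maintains the sliding window's per-type counts incrementally (drop one position on the right, prepend one on the left with a move-to-front items list) plus one merge pass, so per-row work is proportional to distinct window types rather than window size.
import Mathlib
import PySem

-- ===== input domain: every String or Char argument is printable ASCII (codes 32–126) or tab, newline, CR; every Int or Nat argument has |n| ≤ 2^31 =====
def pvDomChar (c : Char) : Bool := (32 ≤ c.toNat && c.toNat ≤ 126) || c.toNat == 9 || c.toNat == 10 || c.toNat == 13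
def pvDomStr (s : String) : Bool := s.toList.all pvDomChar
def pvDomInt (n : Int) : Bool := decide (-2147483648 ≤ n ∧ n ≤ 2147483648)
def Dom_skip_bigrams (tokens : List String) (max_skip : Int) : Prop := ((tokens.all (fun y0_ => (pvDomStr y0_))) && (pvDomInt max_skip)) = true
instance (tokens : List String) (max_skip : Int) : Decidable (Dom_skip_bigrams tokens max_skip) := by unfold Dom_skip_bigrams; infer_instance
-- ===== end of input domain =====

-- B replaces A's per-pair nested index loops by one backward pass that maintains the sliding
-- window's per-type counts incrementally (drop right / prepend left, move-to-front order) and a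
-- final merge pass; an alternative algorithm with per-row work in distinct window types.

-- ===== PORT A =====
def skip_bigrams (tokens : List String) (max_skip : Int) : List (String × String × Int) :=
  let n : Int := PySem.List.len tokens
  ((PySem.List.pyRange 0 n 1).foldl (fun counts i =>
      let upper : Int := if max_skip < 0 then n else min n (i + max_skip + 2)
      (PySem.List.pyRange (i + 1) upper 1).foldl (fun counts j =>
        counts.modify (PySem.List.pyGetD tokens i "", PySem.List.pyGetD tokens j "") 0 (· + 1)) counts)
    (PySem.Dict.empty : PySem.Dict (String × String) Int)).items.map (fun p => (p.1.1, p.1.2, p.2))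

-- ===== PORT B =====
-- `c = 0; for (y, cc) in cur: if y == t: c = cc`
def pvGetCount (cur : List (String × Int)) (t : String) : Int :=
  cur.foldl (fun c p => if p.1 == t then p.2 else c) 0

-- `cur = [(t, c + 1)] + [(y, cc) for (y, cc) in cur if y != t]`
def pvAddLeft (cur : List (String × Int)) (t : String) : List (String × Int) :=
  (t, pvGetCount cur t + 1) :: cur.filter (fun p => !(p.1 == t))

-- `if cur and cur[-1] == (t, 1): cur = cur[:-1] else: cur = [... c - 1 if y == t ...]`
def pvDropRight (cur : List (String × Int)) (t : String) : List (String × Int) :=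
  if cur.getLast? == some (t, 1) then cur.dropLast
  else cur.map (fun p => if p.1 == t then (p.1, p.2 - 1) else p)

def skip_bigrams_alt (tokens : List String) (max_skip : Int) : List (String × String × Int) :=
  let n : Int := PySem.List.len tokens
  -- backward pass: rows accumulated by cons = Python's append-then-reversed
  let st := (PySem.List.pyRange (n - 1) (-1) (-1)).foldl
    (fun (st : List (List (String × Int)) × List (String × Int) × Int) i =>
      let u : Int := if max_skip < 0 then n else min n (i + max_skip + 2)
      let cur1 := if u < st.2.2 then pvDropRight st.2.1 (PySem.List.pyGetD tokens u "") else st.2.1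
      let cur2 := if i + 1 < u then pvAddLeft cur1 (PySem.List.pyGetD tokens (i + 1) "") else cur1
      (cur2 :: st.1, cur2, u))
    ([], [], n)
  -- merge pass: for x, row in zip(tokens, reversed(rows)): for (y, c) in row: counts[(x, y)] += c
  ((tokens.zip st.1).foldl
    (fun counts p => p.2.foldl (fun counts q =>
        PySem.Dict.modify counts (p.1, q.1) 0 (· + q.2)) counts)
    (PySem.Dict.empty : PySem.Dict (String × String) Int)).items.map (fun p => (p.1.1, p.1.2, p.2))

-- ===== PRECONDITION & SPEC =====
def Spec_skip_bigrams (tokens : List String) (max_skip : Int) (out : List (String × String × Int)) : Prop := out = skip_bigrams_alt tokens max_skip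
instance (tokens : List String) (max_skip : Int) (out : List (String × String × Int)) : Decidable (Spec_skip_bigrams tokens max_skip out) := by unfold Spec_skip_bigrams; infer_instance

-- ===== CLAIM (what is proved, stated in full; the proofs are below) =====
def Claim_equal_skip_bigrams : Prop := ∀ (tokens : List String) (max_skip : Int), Dom_skip_bigrams tokens max_skip → Spec_skip_bigrams tokens max_skip (skip_bigrams tokens max_skip)

-- ===== LEMMAS AND PROOFS =====

-- window bookkeeping (proof-only): upper bound and window of row i, in Nat form
def pvUN (N : Nat) (max_skip : Int) (i : Nat) : Nat :=
  if max_skip < 0 then N else min N (i + max_skip.toNat + 2)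

def pvWin (tokens : List String) (max_skip : Int) (i : Nat) : List String :=
  (tokens.drop (i + 1)).take (pvUN tokens.length max_skip i - (i + 1))

def pvRow (tokens : List String) (max_skip : Int) (i : Nat) : List (String × Int) :=
  (PySem.Dict.counter (pvWin tokens max_skip i)).items

lemma pv_insert_insert_comm {κ ν : Type} [BEq κ] [LawfulBEq κ] (d : PySem.Dict κ ν)
    (k k' : κ) (v w : ν) (hk : d.contains k = true) (hne : k' ≠ k) :
    (d.insert k v).insert k' w = (d.insert k' w).insert k v := by
  have hbne : (k' == k) = false := by simpa using hne
  have hbne' : (k == k') = false := by simpa using (Ne.symm hne)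
  apply PySem.Dict.ext
  have hck' : (d.insert k v).contains k' = d.contains k' := by
    rw [PySem.Dict.contains_insert, hbne, Bool.false_or]
  have hck : (d.insert k' w).contains k = true := by
    rw [PySem.Dict.contains_insert, hk, Bool.or_true]
  by_cases h : d.contains k' = true
  · rw [PySem.Dict.items_insert_of_contains _ w (by rw [hck']; exact h),
        PySem.Dict.items_insert_of_contains _ v hk,
        PySem.Dict.items_insert_of_contains _ v hck,
        PySem.Dict.items_insert_of_contains _ w h, List.map_map, List.map_map]
    apply List.map_congr_left
    intro p _
    by_cases hp : (p.1 == k) = true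
    · simp [Function.comp, hbne', (by simpa using hp : p.1 = k)]
    · by_cases hp' : (p.1 == k') = true
      · simp [Function.comp, hbne, (by simpa using hp' : p.1 = k')]
      · simp [Function.comp, hp, hp']
  · have h' : d.contains k' = false := by simpa using h
    rw [PySem.Dict.items_insert_of_not_contains _ w (by rw [hck']; exact h'),
        PySem.Dict.items_insert_of_contains _ v hk,
        PySem.Dict.items_insert_of_contains _ v hck,
        PySem.Dict.items_insert_of_not_contains _ w h', List.map_append]
    simp
    exact fun hh => absurd hh hne

lemma pv_modify_modify_comm {κ ν : Type} [BEq κ] [LawfulBEq κ] (d : PySem.Dict κ ν)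
    (k k' : κ) (d0 d0' : ν) (f g : ν → ν) (hk : d.contains k = true) (hne : k' ≠ k) :
    (d.modify k d0 f).modify k' d0' g = (d.modify k' d0' g).modify k d0 f := by
  simp only [PySem.Dict.modify]
  rw [PySem.Dict.getD_insert_of_ne _ _ _ hne, PySem.Dict.getD_insert_of_ne _ _ _ (Ne.symm hne)]
  exact pv_insert_insert_comm d k k' _ _ hk hne

lemma pv_modify_modify_self {κ ν : Type} [BEq κ] [LawfulBEq κ] (d : PySem.Dict κ ν)
    (k : κ) (d0 : ν) (f g : ν → ν) :
    (d.modify k d0 g).modify k d0 f = d.modify k d0 (fun v => f (g v)) := by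
  simp only [PySem.Dict.modify]
  rw [PySem.Dict.getD_insert_self, PySem.Dict.insert_insert_self]

lemma pv_fold_step_comm (x y : String) (qs : List (String × Int))
    (d : PySem.Dict (String × String) Int) (hd : d.contains (x, y) = true)
    (hy : ∀ q ∈ qs, q.1 ≠ y) :
    qs.foldl (fun d q => d.modify (x, q.1) 0 (· + q.2)) (d.modify (x, y) 0 (· + 1))
      = (qs.foldl (fun d q => d.modify (x, q.1) 0 (· + q.2)) d).modify (x, y) 0 (· + 1) := by
  induction qs generalizing d with
  | nil => rfl
  | cons q t ih =>
    have hq : q.1 ≠ y := hy q (List.mem_cons_self)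
    have hne : (x, q.1) ≠ (x, y) := by
      intro h; exact hq (congrArg Prod.snd h)
    simp only [List.foldl_cons]
    rw [pv_modify_modify_comm d (x, y) (x, q.1) 0 0 _ _ hd hne]
    exact ih _ (by rw [PySem.Dict.contains_modify]; simp [hd]) (fun q hq => hy q (List.mem_cons_of_mem _ hq))

lemma pv_fold_items_update (x y : String) (cnt : Int) (ps : List (String × Int))
    (d : PySem.Dict (String × String) Int)
    (hmem : (y, cnt) ∈ ps) (hnd : (ps.map Prod.fst).Nodup) :
    (ps.map (fun p => if (p.1 == y) = true then (y, cnt + 1) else p)).foldl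
        (fun d q => d.modify (x, q.1) 0 (· + q.2)) d
      = (ps.foldl (fun d q => d.modify (x, q.1) 0 (· + q.2)) d).modify (x, y) 0 (· + 1) := by
  induction ps generalizing d with
  | nil => cases hmem
  | cons p t ih =>
    obtain ⟨py, pc⟩ := p
    simp only [List.map_cons] at hnd
    have hnd' := List.nodup_cons.mp hnd
    by_cases hp : py = y
    · subst hp
      have hty : ∀ q ∈ t, q.1 ≠ py := by
        intro q hq hqy
        exact hnd'.1 (hqy ▸ List.mem_map_of_mem hq)
      have hpc : pc = cnt := by
        rcases List.mem_cons.mp hmem with h | h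
        · exact (congrArg Prod.snd h).symm
        · exact absurd (List.mem_map_of_mem (f := Prod.fst) h) hnd'.1
      subst hpc
      rw [List.map_cons, List.map_congr_left (fun q hq => if_neg (by simpa using hty q hq)),
          List.map_id_fun']
      simp only [List.foldl_cons, beq_self_eq_true, if_pos]
      rw [← pv_fold_step_comm x py t (PySem.Dict.modify d (x, py) 0 (· + pc))
            (by rw [PySem.Dict.contains_modify]; simp) hty,
          pv_modify_modify_self]
      have : (fun v : Int => v + pc + 1) = (fun v : Int => v + (pc + 1)) := by
        funext v; omega
      simp only [this, id_eq]
    · have hmem' : (y, cnt) ∈ t := by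
        rcases List.mem_cons.mp hmem with h | h
        · exact absurd (congrArg Prod.fst h.symm) hp
        · exact h
      have hb : (py == y) = false := by simpa using hp
      simp only [List.map_cons, hb, Bool.false_eq_true, if_false, List.foldl_cons]
      exact ih _ hmem' hnd'.2

lemma pv_row_eq (x : String) (window : List String) (d : PySem.Dict (String × String) Int) :
    window.foldl (fun d y => d.modify (x, y) 0 (· + 1)) d
      = (PySem.Dict.counter window).items.foldl (fun d q => d.modify (x, q.1) 0 (· + q.2)) d := by
  induction window using List.reverseRecOn generalizing d with
  | nil => rfl
  | append_singleton ws y ih =>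
    rw [List.foldl_append, PySem.Dict.counter_append_singleton]
    simp only [List.foldl_cons, List.foldl_nil]
    rw [ih]
    set C := PySem.Dict.counter ws with hC
    have hmod : C.modify y 0 (· + 1) = C.insert y (C.getD y 0 + 1) := rfl
    by_cases hy : C.contains y = true
    · obtain ⟨v, hv⟩ : ∃ v, C.get? y = some v := by
        rcases h : C.get? y with _ | v
        · rw [PySem.Dict.contains_eq_isSome_get?, h] at hy; cases hy
        · exact ⟨v, rfl⟩
      have hgetD : C.getD y 0 = v := PySem.Dict.getD_of_get?_eq_some _ _ hv
      have hmem : (y, v) ∈ C.items := PySem.Dict.mem_items_of_get?_eq_some _ hv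
      have hnd : (C.items.map Prod.fst).Nodup := by
        have := PySem.Dict.nodup_keys_counter (κ := String) ws
        simpa [PySem.Dict.keys, hC] using this
      rw [hmod, hgetD, PySem.Dict.items_insert_of_contains _ _ hy]
      exact (pv_fold_items_update x y v C.items d hmem hnd).symm
    · rw [hmod, PySem.Dict.items_insert_of_not_contains _ _ (by simpa using hy),
          PySem.Dict.getD_of_not_contains _ _ (by simpa using hy), List.foldl_append]
      simp

lemma pv_map_range_slice {α : Type} (xs : List α) (dflt : α) (a b : Int)
    (h0 : 0 ≤ a) (hab : a ≤ b) (hb : b ≤ PySem.List.len xs) :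
    (PySem.List.pyRange a b 1).map (fun j => PySem.List.pyGetD xs j dflt)
      = List.take (b.toNat - a.toNat) (List.drop a.toNat xs) := by
  have hsplit := PySem.List.pyRange_one_append a b (PySem.List.len xs) hab hb
  have hfull := PySem.List.map_pyGetD_pyRange xs dflt h0
  rw [hsplit, List.map_append] at hfull
  have hlen : ((PySem.List.pyRange a b 1).map (fun j => PySem.List.pyGetD xs j dflt)).length
      = b.toNat - a.toNat := by
    rw [List.length_map, PySem.List.length_pyRange_one]; omega
  rw [← hfull, List.take_left' hlen]

-- scan over (k, f k) pairs with nodup keys returns f t (or the default when t is absent)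
lemma pv_scan_map (s : List String) (f : String → Int) (t : String) (acc : Int)
    (hnd : s.Nodup) :
    (s.map (fun k => (k, f k))).foldl (fun c p => if p.1 == t then p.2 else c) acc
      = if t ∈ s then f t else acc := by
  induction s generalizing acc with
  | nil => simp
  | cons a s ih =>
    have hnd' := List.nodup_cons.mp hnd
    by_cases ha : a = t
    · subst ha
      simp only [List.map_cons, List.foldl_cons, beq_self_eq_true, if_pos, List.mem_cons,
        true_or, if_true]
      rw [ih _ hnd'.2, if_neg hnd'.1]
    · have hb : (a == t) = false := by simpa using ha
      simp only [List.map_cons, List.foldl_cons, hb, Bool.false_eq_true, if_false]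
      rw [ih _ hnd'.2]
      simp [List.mem_cons, ha, Ne.symm ha]
  termination_by s.length

lemma pv_getCount_counter (w : List String) (t : String) :
    pvGetCount (PySem.Dict.counter w).items t = (w.count t : Int) := by
  unfold pvGetCount
  rw [PySem.Dict.items_counter,
      pv_scan_map _ _ _ _ (PySem.Set.nodup_ofList w)]
  by_cases h : t ∈ w
  · rw [if_pos ((PySem.Set.mem_ofList w t).mpr h)]
  · rw [if_neg (fun hc => h ((PySem.Set.mem_ofList w t).mp hc))]
    simp [List.count_eq_zero.mpr h]

-- prepending a token to the window = B's move-to-front update of the items list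
lemma pv_addLeft_counter (w : List String) (t : String) :
    pvAddLeft (PySem.Dict.counter w).items t = (PySem.Dict.counter (t :: w)).items := by
  unfold pvAddLeft
  rw [pv_getCount_counter]
  rw [PySem.Dict.items_counter, PySem.Dict.items_counter, PySem.Set.ofList_cons, List.map_cons]
  congr 1
  · simp [List.count_cons_self]
  · simp only [PySem.Set.discard, List.filter_map]
    apply List.map_congr_left
    intro k hk
    have hkt : ¬ (k = t) := by simpa using (List.mem_filter.mp hk).2
    have htk : ¬ (t = k) := fun h => hkt h.symm
    simp [List.count_cons, hkt, htk]

-- dropping the rightmost window position = B's pop-or-decrement update of the items list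
lemma pv_dropRight_counter (w : List String) (y : String) :
    pvDropRight (PySem.Dict.counter (w ++ [y])).items y = (PySem.Dict.counter w).items := by
  unfold pvDropRight
  rw [PySem.Dict.items_counter, PySem.Dict.items_counter, PySem.Set.ofList_append_singleton]
  by_cases hy : y ∈ w
  · have hadd : (PySem.Set.ofList w).add y = PySem.Set.ofList w := by
      simp [PySem.Set.add, hy]
    rw [hadd]
    have hcond : ((List.map (fun k => (k, ((w ++ [y]).count k : Int))) (PySem.Set.ofList w)).getLast?
        == some (y, 1)) = false := by
      apply beq_eq_false_iff_ne.mpr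
      intro hlast
      have hmem := List.mem_of_getLast? hlast
      obtain ⟨k, hk, hek⟩ := List.mem_map.mp hmem
      rw [Prod.mk.injEq] at hek
      obtain ⟨hky, hval⟩ := hek
      rw [hky] at hval
      have hcnt : (w ++ [y]).count y = w.count y + 1 := by
        simp [List.count_append]
      have hpos : 0 < w.count y := List.count_pos_iff.mpr hy
      rw [hcnt] at hval
      push_cast at hval
      omega
    rw [hcond]
    simp only [Bool.false_eq_true, if_false, List.map_map]
    apply List.map_congr_left
    intro k _
    by_cases hk : k = y
    · subst hk
      simp [Function.comp, List.count_append]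
    · have hb : (k == y) = false := by simpa using hk
      have hyk : ¬ (y = k) := fun h => hk h.symm
      simp [Function.comp, hb, List.count_append, List.count_singleton, hk, hyk]
  · have hadd : (PySem.Set.ofList w).add y = PySem.Set.ofList w ++ [y] := by
      simp [PySem.Set.add, hy]
    rw [hadd, List.map_append, List.map_singleton]
    have h0 : List.count y w = 0 := List.count_eq_zero.mpr hy
    have hyc : ((w ++ [y]).count y : Int) = 1 := by
      simp [List.count_append, h0]
    rw [hyc]
    have hcond : ((List.map (fun k => (k, ((w ++ [y]).count k : Int))) (PySem.Set.ofList w) ++ [(y, (1 : Int))]).getLast?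
        == some (y, 1)) = true := by
      simp
    rw [hcond]
    simp only [if_true, List.dropLast_concat]
    apply List.map_congr_left
    intro k hk
    have hky : ¬ (k = y) := fun h => hy (h ▸ (PySem.Set.mem_ofList w k).mp hk)
    have hyk : ¬ (y = k) := fun h => hky h.symm
    simp [List.count_append, List.count_singleton, hky, hyk]

-- bridge between the port's Int upper bound and its Nat form
lemma pv_uI_eq (N : Nat) (max_skip : Int) (m : Nat) :
    (if max_skip < 0 then ((N : Nat) : Int) else min ((N : Nat) : Int) ((m : Int) + max_skip + 2))
      = ((pvUN N max_skip m : Nat) : Int) := by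
  unfold pvUN
  split_ifs with h
  · rfl
  · push_cast [Int.toNat_of_nonneg (not_lt.mp h)]
    omega

lemma pv_getD_nat (tokens : List String) (m : Nat) (h : m < tokens.length) :
    PySem.List.pyGetD tokens ((m : Int)) "" = tokens[m] := by
  rw [PySem.List.pyGetD_natCast, List.getD_eq_getElem _ _ h]

-- one backward step of B turns row m+1's window counts into row m's
lemma pv_step_eq (tokens : List String) (max_skip : Int) (m : Nat) (hm : m < tokens.length) :
    (if ((m : Int)) + 1 < ((pvUN tokens.length max_skip m : Nat) : Int)
      then pvAddLeft (if ((pvUN tokens.length max_skip m : Nat) : Int) < ((pvUN tokens.length max_skip (m+1) : Nat) : Int)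
          then pvDropRight (pvRow tokens max_skip (m+1)) (PySem.List.pyGetD tokens ((pvUN tokens.length max_skip m : Nat) : Int) "")
          else pvRow tokens max_skip (m+1)) (PySem.List.pyGetD tokens ((m : Int) + 1) "")
      else (if ((pvUN tokens.length max_skip m : Nat) : Int) < ((pvUN tokens.length max_skip (m+1) : Nat) : Int)
          then pvDropRight (pvRow tokens max_skip (m+1)) (PySem.List.pyGetD tokens ((pvUN tokens.length max_skip m : Nat) : Int) "")
          else pvRow tokens max_skip (m+1)))
    = pvRow tokens max_skip m := by
  by_cases hms : max_skip < 0
  · -- no skip limit: the window is the whole suffix, never shrinks on the right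
    have hu1 : pvUN tokens.length max_skip m = tokens.length := by unfold pvUN; rw [if_pos hms]
    have hu2 : pvUN tokens.length max_skip (m+1) = tokens.length := by unfold pvUN; rw [if_pos hms]
    rw [hu1, hu2]
    have hw1 : pvWin tokens max_skip (m+1) = tokens.drop (m+2) := by
      unfold pvWin pvUN
      rw [if_pos hms]
      exact List.take_of_length_le (by simp)
    have hw0 : pvWin tokens max_skip m = tokens.drop (m+1) := by
      unfold pvWin pvUN
      rw [if_pos hms]
      exact List.take_of_length_le (by simp)
    rw [if_neg (lt_irrefl _)]
    by_cases hlt : m + 1 < tokens.length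
    · have hlt' : ((m : Int)) + 1 < ((tokens.length : Nat) : Int) := by exact_mod_cast hlt
      rw [if_pos hlt']
      have hget : PySem.List.pyGetD tokens ((m : Int) + 1) "" = tokens[m+1] := by
        rw [show ((m : Int) + 1) = (((m+1 : Nat)) : Int) by push_cast; ring]
        exact pv_getD_nat tokens (m+1) hlt
      unfold pvRow
      rw [hget, hw1, hw0, pv_addLeft_counter]
      exact congrArg PySem.Dict.items
        (congrArg PySem.Dict.counter (List.drop_eq_getElem_cons hlt).symm)
    · have hlt' : ¬ (((m : Int)) + 1 < ((tokens.length : Nat) : Int)) := by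
        push_cast
        omega
      rw [if_neg hlt']
      unfold pvRow
      rw [hw1, hw0, List.drop_eq_nil_of_le (by omega), List.drop_eq_nil_of_le (by omega)]
  · -- bounded skip: the window slides, dropping at most one position on the right
    have hu1 : pvUN tokens.length max_skip m = min tokens.length (m + max_skip.toNat + 2) := by
      unfold pvUN; rw [if_neg hms]
    have hu2 : pvUN tokens.length max_skip (m+1) = min tokens.length (m + 1 + max_skip.toNat + 2) := by
      unfold pvUN; rw [if_neg hms]
    by_cases hdrop : pvUN tokens.length max_skip m < pvUN tokens.length max_skip (m+1)
    · have he1 : pvUN tokens.length max_skip m = m + max_skip.toNat + 2 := by omega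
      have heN : m + max_skip.toNat + 2 < tokens.length := by omega
      have he2 : pvUN tokens.length max_skip (m+1) = m + max_skip.toNat + 3 := by omega
      have hdrop' : ((pvUN tokens.length max_skip m : Nat) : Int)
          < ((pvUN tokens.length max_skip (m+1) : Nat) : Int) := by
        exact_mod_cast hdrop
      rw [if_pos hdrop']
      have hg : PySem.List.pyGetD tokens ((pvUN tokens.length max_skip m : Nat) : Int) ""
          = tokens[m + max_skip.toNat + 2]'(by omega) := by
        rw [he1]
        exact pv_getD_nat tokens _ heN
      have hklen : max_skip.toNat < (tokens.drop (m+2)).length := by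
        have hld : (tokens.drop (m+2)).length = tokens.length - (m+2) := by simp
        omega
      have hw1 : pvWin tokens max_skip (m+1)
          = (tokens.drop (m+2)).take max_skip.toNat ++ [tokens[m + max_skip.toNat + 2]'(by omega)] := by
        unfold pvWin
        rw [he2, show m + max_skip.toNat + 3 - (m + 1 + 1) = max_skip.toNat + 1 by omega,
            List.take_succ, List.getElem?_eq_getElem hklen]
        have hel : (List.drop (m+2) tokens)[max_skip.toNat]'hklen
            = tokens[m + max_skip.toNat + 2]'(by omega) := by
          rw [List.getElem_drop]
          congr 1
          omega
        rw [hel]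
        rfl
      have hguard2 : ((m : Int)) + 1 < ((pvUN tokens.length max_skip m : Nat) : Int) := by
        rw [he1]; push_cast; omega
      rw [if_pos hguard2]
      have hget : PySem.List.pyGetD tokens ((m : Int) + 1) "" = tokens[m+1]'(by omega) := by
        rw [show ((m : Int) + 1) = (((m+1 : Nat)) : Int) by push_cast; ring]
        exact pv_getD_nat tokens (m+1) (by omega)
      unfold pvRow
      rw [hget, hg, hw1, pv_dropRight_counter, pv_addLeft_counter]
      apply congrArg PySem.Dict.items
      apply congrArg PySem.Dict.counter
      unfold pvWin
      rw [he1, show m + max_skip.toNat + 2 - (m + 1) = max_skip.toNat + 1 by omega,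
          List.drop_eq_getElem_cons (show m + 1 < tokens.length by omega), List.take_succ_cons]
    · have he : pvUN tokens.length max_skip (m+1) = pvUN tokens.length max_skip m := by omega
      have hdrop' : ¬ (((pvUN tokens.length max_skip m : Nat) : Int)
          < ((pvUN tokens.length max_skip (m+1) : Nat) : Int)) := by
        exact_mod_cast hdrop
      rw [if_neg hdrop']
      by_cases hlt : m + 1 < pvUN tokens.length max_skip m
      · have hlt' : ((m : Int)) + 1 < ((pvUN tokens.length max_skip m : Nat) : Int) := by
          push_cast; omega
        rw [if_pos hlt']
        have hget : PySem.List.pyGetD tokens ((m : Int) + 1) "" = tokens[m+1]'(by omega) := by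
          rw [show ((m : Int) + 1) = (((m+1 : Nat)) : Int) by push_cast; ring]
          exact pv_getD_nat tokens (m+1) (by omega)
        unfold pvRow
        have hw1 : pvWin tokens max_skip (m+1)
            = (tokens.drop (m+2)).take (pvUN tokens.length max_skip m - (m+2)) := by
          unfold pvWin
          rw [he]
        rw [hget, hw1, pv_addLeft_counter]
        apply congrArg PySem.Dict.items
        apply congrArg PySem.Dict.counter
        unfold pvWin
        rw [show pvUN tokens.length max_skip m - (m + 1) = (pvUN tokens.length max_skip m - (m+2)) + 1 by omega,
            List.drop_eq_getElem_cons (show m + 1 < tokens.length by omega), List.take_succ_cons]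
      · have hlt' : ¬ (((m : Int)) + 1 < ((pvUN tokens.length max_skip m : Nat) : Int)) := by
          push_cast; omega
        rw [if_neg hlt']
        unfold pvRow pvWin
        rw [he, show pvUN tokens.length max_skip m - (m + 1 + 1) = 0 by omega,
            show pvUN tokens.length max_skip m - (m + 1) = 0 by omega]
        simp

-- the merged form both ports reduce to
def pvMerged (tokens : List String) (max_skip : Int) : PySem.Dict (String × String) Int :=
  (List.range tokens.length).foldl (fun d i =>
    (pvRow tokens max_skip i).foldl (fun d q =>
      PySem.Dict.modify d (PySem.List.pyGetD tokens (i : Int) "", q.1) 0 (· + q.2)) d)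
    PySem.Dict.empty

lemma pv_A_eq_merged (tokens : List String) (max_skip : Int) :
    skip_bigrams tokens max_skip
      = (pvMerged tokens max_skip).items.map (fun p => (p.1.1, p.1.2, p.2)) := by
  unfold skip_bigrams pvMerged
  apply congrArg (List.map _)
  apply congrArg PySem.Dict.items
  rw [PySem.List.len_eq, PySem.List.pyRange_zero_nat, List.foldl_map]
  apply PySem.List.foldl_congr_mem
  intro acc m hm
  have hmN : m < tokens.length := List.mem_range.mp hm
  rw [pv_uI_eq tokens.length max_skip m]
  have h1 : m + 1 ≤ pvUN tokens.length max_skip m := by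
    unfold pvUN; split_ifs <;> omega
  have h2 : pvUN tokens.length max_skip m ≤ tokens.length := by
    unfold pvUN; split_ifs <;> omega
  have hmap := pv_map_range_slice tokens "" ((m : Int) + 1) ((pvUN tokens.length max_skip m : Nat) : Int)
    (by omega) (by exact_mod_cast h1) (by rw [PySem.List.len_eq]; exact_mod_cast h2)
  have hwin : (PySem.List.pyRange ((m : Int) + 1) ((pvUN tokens.length max_skip m : Nat) : Int) 1).map
      (fun j => PySem.List.pyGetD tokens j "") = pvWin tokens max_skip m := by
    rw [hmap]
    unfold pvWin
    have e1 : ((pvUN tokens.length max_skip m : Nat) : Int).toNat - ((m : Int) + 1).toNat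
        = pvUN tokens.length max_skip m - (m + 1) := by omega
    have e2 : ((m : Int) + 1).toNat = m + 1 := by omega
    rw [e1, e2]
  rw [← List.foldl_map (f := fun j : Int => PySem.List.pyGetD tokens j "")
        (g := fun (d : PySem.Dict (String × String) Int) y =>
          PySem.Dict.modify d (PySem.List.pyGetD tokens (m : Int) "", y) 0 (· + 1)),
      hwin, pv_row_eq]
  rfl

-- invariant of B's backward pass: it produces exactly the per-row window counters
lemma pv_B_fold (tokens : List String) (max_skip : Int) (m : Nat) (hm : m ≤ tokens.length)
    (rows0 : List (List (String × Int))) :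
    (PySem.List.pyRange ((m : Int) - 1) (-1) (-1)).foldl
      (fun (st : List (List (String × Int)) × List (String × Int) × Int) i =>
        let u : Int := if max_skip < 0 then ((tokens.length : Nat) : Int)
          else min ((tokens.length : Nat) : Int) (i + max_skip + 2)
        let cur1 := if u < st.2.2 then pvDropRight st.2.1 (PySem.List.pyGetD tokens u "") else st.2.1
        let cur2 := if i + 1 < u then pvAddLeft cur1 (PySem.List.pyGetD tokens (i + 1) "") else cur1
        (cur2 :: st.1, cur2, u))
      (rows0, pvRow tokens max_skip m, ((pvUN tokens.length max_skip m : Nat) : Int))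
    = ((List.range m).map (pvRow tokens max_skip) ++ rows0, pvRow tokens max_skip 0,
        ((pvUN tokens.length max_skip 0 : Nat) : Int)) := by
  induction m generalizing rows0 with
  | zero =>
    rw [PySem.List.pyRange_neg_one_eq_nil (by omega)]
    rfl
  | succ m ih =>
    rw [show ((((m+1 : Nat)) : Int) - 1) = ((m : Nat) : Int) by push_cast; ring,
        PySem.List.pyRange_neg_one_cons (by omega), List.foldl_cons]
    dsimp only
    rw [pv_uI_eq tokens.length max_skip m, pv_step_eq tokens max_skip m (by omega),
        ih (by omega) (pvRow tokens max_skip m :: rows0), List.range_succ, List.map_append,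
        List.append_assoc]
    simp

lemma pv_B_eq_merged (tokens : List String) (max_skip : Int) :
    skip_bigrams_alt tokens max_skip
      = (pvMerged tokens max_skip).items.map (fun p => (p.1.1, p.1.2, p.2)) := by
  unfold skip_bigrams_alt
  apply congrArg (List.map _)
  apply congrArg PySem.Dict.items
  rw [PySem.List.len_eq]
  have hrow : pvRow tokens max_skip tokens.length = [] := by
    unfold pvRow pvWin
    rw [List.drop_eq_nil_of_le (by omega)]
    simp
    rfl
  have hu : ((pvUN tokens.length max_skip tokens.length : Nat) : Int) = ((tokens.length : Nat) : Int) := by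
    have : pvUN tokens.length max_skip tokens.length = tokens.length := by
      unfold pvUN; split_ifs <;> omega
    rw [this]
  rw [show (([], [], ((tokens.length : Nat) : Int)) :
        List (List (String × Int)) × List (String × Int) × Int)
      = ([], pvRow tokens max_skip tokens.length,
          ((pvUN tokens.length max_skip tokens.length : Nat) : Int)) by rw [hrow, hu],
      pv_B_fold tokens max_skip tokens.length le_rfl []]
  have htok : tokens = (List.range tokens.length).map (fun (i : Nat) => PySem.List.pyGetD tokens (i : Int) "") := by
    conv_lhs => rw [← PySem.List.map_pyGetD_pyRange_zero tokens ""]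
    rw [PySem.List.len_eq, PySem.List.pyRange_zero_nat, List.map_map]
    rfl
  rw [List.append_nil]
  conv_lhs => rw [show tokens.zip ((List.range tokens.length).map (pvRow tokens max_skip))
      = ((List.range tokens.length).map (fun (i : Nat) => PySem.List.pyGetD tokens (i : Int) "")).zip
          ((List.range tokens.length).map (pvRow tokens max_skip)) by rw [← htok]]
  rw [List.zip_map', List.foldl_map]
  rfl

-- ===== VERDICT (by name: the statement is the Claim_ definition above) =====
theorem skip_bigrams_spec : Claim_equal_skip_bigrams := by
  intro tokens max_skip _
  unfold Spec_skip_bigrams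
  rw [pv_A_eq_merged, pv_B_eq_merged]
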